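-- pv_equiv track=rewrite | github.com/dariaszasz/Fundamentele_programarii | tema_2/ex2.py | symmetrisch
-- ===== SOURCE A (Python) =====
-- def umkehr(n): #Umkehrbare einer Zahl
--      inv=0
--      while n>0:
--          inv=inv*10 + n%10
--          n=int(n/10)
--      return inv
--
-- def symmetrisch(zahlenliste):
--      ct=0
--      for i in range(len(zahlenliste)):
--          for j in range(i+1,len(zahlenliste)):
--              if zahlenliste[i]==(umkehr(zahlenliste[j])): #man sucht das Umkehrbare El
--                  ct+=1
--                  break
--
--      return ct
-- ===== SOURCE B (Python) =====
-- def symmetrisch(zahlenliste):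
--     # single right-to-left pass: keep the set of digit-reverses of elements already
--     # seen (i.e. elements at later indices); count x when x is in that set
--     seen = set()
--     ct = 0
--     for x in reversed(zahlenliste):
--         if x in seen:
--             ct += 1
--         inv = 0
--         n = x
--         while n > 0:
--             inv = inv * 10 + n % 10
--             n //= 10
--         seen.add(inv)
--     return ct
-- ===== Notes on version B (the rewrite author's own statement) =====
-- stated objective: faster
-- what changed: Replaces A's nested scan (for each element, search all later elements for one whose digit-reverse equals it) by a single right-to-left pass that maintains a hash set of the digit-reverses of the elements already seen and counts membership hits.
import Mathlib
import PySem

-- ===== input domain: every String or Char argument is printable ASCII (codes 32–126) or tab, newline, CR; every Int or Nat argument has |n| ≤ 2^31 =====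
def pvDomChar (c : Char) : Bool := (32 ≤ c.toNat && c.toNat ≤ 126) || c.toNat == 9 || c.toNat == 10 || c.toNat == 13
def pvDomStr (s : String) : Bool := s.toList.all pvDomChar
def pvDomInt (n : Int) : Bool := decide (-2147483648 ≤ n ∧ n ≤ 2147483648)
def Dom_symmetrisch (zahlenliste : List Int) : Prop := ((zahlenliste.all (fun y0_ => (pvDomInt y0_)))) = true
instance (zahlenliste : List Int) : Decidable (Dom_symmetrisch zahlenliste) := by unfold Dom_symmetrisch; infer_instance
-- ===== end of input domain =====

-- B replaces A's quadratic "for each i scan the later elements" by one right-to-left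
-- pass over the list maintaining the set of digit-reverses of elements already seen.

-- ===== PORT A =====
-- the while loop of `umkehr`: runs only while n > 0, so on Nat; `int(n/10)` is n // 10
-- there (n positive, |n| ≤ 2^31 < 2^53, so float division truncates exactly)
def umkehrGo (n : Nat) (inv : Int) : Int :=
  if h : 0 < n then umkehrGo (n / 10) (inv * 10 + (n % 10 : Nat)) else inv
termination_by n
decreasing_by exact Nat.div_lt_self h (by omega)

def umkehr (n : Int) : Int := umkehrGo n.toNat 0   -- for n ≤ 0 the loop body never runs

-- inner `for j in range(i+1, len)` with `break` at the first match
def symInner (l : List Int) (xi : Int) : List Int → Int → Int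
  | [], ct => ct
  | j :: js, ct =>
      if xi == umkehr (PySem.List.pyGetD l j 0) then ct + 1   -- j from range: always in range
      else symInner l xi js ct

def symmetrisch (zahlenliste : List Int) : Int :=
  (PySem.List.pyRange 0 (zahlenliste.length : Int) 1).foldl
    (fun ct i =>
      symInner zahlenliste (PySem.List.pyGetD zahlenliste i 0)
        (PySem.List.pyRange (i + 1) (zahlenliste.length : Int) 1) ct)
    0

-- ===== PORT B =====
-- Source B's inline digit-reverse loop (same while loop as A's helper)
def umkehrAltGo (n : Nat) (inv : Int) : Int :=
  if h : 0 < n then umkehrAltGo (n / 10) (inv * 10 + (n % 10 : Nat)) else inv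
termination_by n
decreasing_by exact Nat.div_lt_self h (by omega)

def umkehrAlt (x : Int) : Int := umkehrAltGo x.toNat 0

-- `for x in reversed(zahlenliste): if x in seen: ct += 1; seen.add(rev(x))`
def symAltGo : List Int → PySem.Set Int → Int → Int
  | [], _seen, ct => ct
  | x :: xs, seen, ct =>
      symAltGo xs (PySem.Set.add seen (umkehrAlt x))
        (if PySem.Set.contains seen x then ct + 1 else ct)

def symmetrisch_alt (zahlenliste : List Int) : Int :=
  symAltGo zahlenliste.reverse PySem.Set.empty 0

-- ===== PRECONDITION & SPEC =====
def Spec_symmetrisch (zahlenliste : List Int) (out : Int) : Prop := out = symmetrisch_alt zahlenliste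
instance (zahlenliste : List Int) (out : Int) : Decidable (Spec_symmetrisch zahlenliste out) := by unfold Spec_symmetrisch; infer_instance

-- ===== CLAIM (what is proved, stated in full; the proofs are below) =====
def Claim_equal_symmetrisch : Prop := ∀ (zahlenliste : List Int), Dom_symmetrisch zahlenliste → Spec_symmetrisch zahlenliste (symmetrisch zahlenliste)

-- ===== LEMMAS AND PROOFS =====

-- common characterisation: count of elements having a later element whose reverse equals them
def cnt : List Int → Int
  | [] => 0
  | x :: xs => (if xs.any (fun v => x == umkehr v) then 1 else 0) + cnt xs

lemma umkehrAltGo_eq (n : Nat) : ∀ inv, umkehrAltGo n inv = umkehrGo n inv := by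
  induction n using Nat.strong_induction_on with
  | _ n ih =>
    intro inv
    rw [umkehrAltGo, umkehrGo]
    split
    · exact ih _ (Nat.div_lt_self ‹_› (by omega)) _
    · rfl

lemma umkehrAlt_eq (x : Int) : umkehrAlt x = umkehr x := by
  simp [umkehrAlt, umkehr, umkehrAltGo_eq]

-- A side ---------------------------------------------------------------------

lemma symInner_eq (l : List Int) (xi : Int) :
    ∀ js ct, symInner l xi js ct =
      ct + (if js.any (fun j => xi == umkehr (PySem.List.pyGetD l j 0)) then 1 else 0) := by
  intro js
  induction js with
  | nil => simp [symInner]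
  | cons j js ih =>
    intro ct
    by_cases h : xi == umkehr (PySem.List.pyGetD l j 0)
    · simp [symInner, h]
    · simp [symInner, h, ih]

def F (l : List Int) (i : Int) : Int :=
  if (l.drop (i.toNat + 1)).any (fun v => PySem.List.pyGetD l i 0 == umkehr v) then 1 else 0

lemma inner_any_eq (l : List Int) (i : Int) (hi : 0 ≤ i) (xi : Int) :
    (PySem.List.pyRange (i + 1) (l.length : Int) 1).any
        (fun j => xi == umkehr (PySem.List.pyGetD l j 0)) =
      (l.drop (i.toNat + 1)).any (fun v => xi == umkehr v) := by
  have h1 : (PySem.List.pyRange (i + 1) (l.length : Int) 1).map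
      (fun j => PySem.List.pyGetD l j 0) = l.drop (i + 1).toNat :=
    PySem.List.map_pyGetD_pyRange' l 0 (show (0:Int) ≤ i + 1 by omega)
  have h2 : (PySem.List.pyRange (i + 1) (l.length : Int) 1).any
      (fun j => xi == umkehr (PySem.List.pyGetD l j 0)) =
      ((PySem.List.pyRange (i + 1) (l.length : Int) 1).map
        (fun j => PySem.List.pyGetD l j 0)).any (fun v => xi == umkehr v) := by
    rw [List.any_map]
    rfl
  have h3 : (i + 1).toNat = i.toNat + 1 := by omega
  rw [h2, h1, h3]

lemma symmetrisch_eq_sum (l : List Int) :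
    symmetrisch l = ((PySem.List.pyRange 0 (l.length : Int) 1).map (F l)).sum := by
  unfold symmetrisch
  rw [PySem.List.foldl_congr_mem _ _ (fun ct i => ct + F l i) _
      (by
        intro ct i hi
        have hmem := (PySem.List.mem_pyRange_one).mp hi
        rw [symInner_eq, inner_any_eq l i hmem.1]
        rfl)]
  rw [PySem.List.foldl_add]
  simp

lemma F_cons_succ (x : Int) (xs : List Int) (k : Nat) :
    F (x :: xs) (1 + (k : Int)) = F xs (k : Int) := by
  have h : (1 : Int) + (k : Int) = ((k + 1 : Nat) : Int) := by push_cast; ring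
  unfold F
  rw [h]
  simp only [PySem.List.pyGetD_natCast, Int.toNat_natCast, List.getD_cons_succ,
    List.drop_succ_cons]

lemma sum_shift (x : Int) (xs : List Int) :
    ((PySem.List.pyRange 1 ((xs.length : Int) + 1) 1).map (F (x :: xs))).sum =
      ((PySem.List.pyRange 0 (xs.length : Int) 1).map (F xs)).sum := by
  rw [PySem.List.pyRange_one, PySem.List.pyRange_one]
  have hlen : (((xs.length : Int) + 1 - 1).toNat) = xs.length := by omega
  have hlen0 : (((xs.length : Int) - 0).toNat) = xs.length := by omega
  rw [hlen, hlen0, List.map_map, List.map_map]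
  congr 1
  apply List.map_congr_left
  intro k _
  simp only [Function.comp]
  have h0 : (0 : Int) + (k : Int) = (k : Int) := by ring
  rw [h0, F_cons_succ]

lemma symmetrisch_eq_cnt (l : List Int) : symmetrisch l = cnt l := by
  induction l with
  | nil => rfl
  | cons x xs ih =>
    rw [symmetrisch_eq_sum]
    have hcons : PySem.List.pyRange 0 (((x :: xs).length : Int)) 1 =
        0 :: PySem.List.pyRange 1 (((x :: xs).length : Int)) 1 := by
      rw [PySem.List.pyRange_one_cons (by simp)]
      norm_num
    rw [hcons]
    have hF0 : F (x :: xs) 0 = (if xs.any (fun v => x == umkehr v) then 1 else 0) := by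
      unfold F
      simp [PySem.List.pyGetD_zero_cons]
    have hlen : ((x :: xs).length : Int) = (xs.length : Int) + 1 := by simp
    rw [List.map_cons, List.sum_cons, hF0, hlen, sum_shift, ← symmetrisch_eq_sum, ih]
    rfl

-- B side ---------------------------------------------------------------------

def seenAfter (m : List Int) (seen : PySem.Set Int) : PySem.Set Int :=
  m.foldl (fun s x => PySem.Set.add s (umkehrAlt x)) seen

lemma contains_add (s : PySem.Set Int) (x y : Int) :
    PySem.Set.contains (PySem.Set.add s x) y = (PySem.Set.contains s y || y == x) := by
  simp only [PySem.Set.contains]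
  rw [Bool.eq_iff_iff]
  simp [PySem.Set.mem_add]

lemma contains_seenAfter (y : Int) :
    ∀ (m : List Int) (seen : PySem.Set Int),
      PySem.Set.contains (seenAfter m seen) y =
        (PySem.Set.contains seen y || m.any (fun v => y == umkehrAlt v)) := by
  intro m
  induction m with
  | nil => simp [seenAfter]
  | cons x m ih =>
    intro seen
    show PySem.Set.contains (seenAfter m (PySem.Set.add seen (umkehrAlt x))) y = _
    rw [ih, contains_add]
    simp [Bool.or_assoc, Bool.or_comm, Bool.or_left_comm]

lemma symAltGo_snoc (y : Int) :
    ∀ (m : List Int) (seen : PySem.Set Int) (ct : Int),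
      symAltGo (m ++ [y]) seen ct =
        symAltGo m seen ct +
          (if PySem.Set.contains (seenAfter m seen) y then 1 else 0) := by
  intro m
  induction m with
  | nil =>
    intro seen ct
    simp only [List.nil_append, symAltGo, seenAfter, List.foldl_nil]
    split_ifs <;> ring
  | cons x m ih =>
    intro seen ct
    show symAltGo (m ++ [y]) _ _ = symAltGo m _ _ + _
    rw [ih]
    rfl

lemma symmetrisch_alt_eq_cnt (l : List Int) : symmetrisch_alt l = cnt l := by
  induction l with
  | nil => rfl
  | cons x xs ih =>
    unfold symmetrisch_alt
    rw [List.reverse_cons, symAltGo_snoc, contains_seenAfter]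
    unfold symmetrisch_alt at ih
    rw [ih]
    have : (xs.reverse.any (fun v => x == umkehrAlt v)) = xs.any (fun v => x == umkehr v) := by
      rw [List.any_reverse]
      apply PySem.List.any_congr_mem
      intro v _
      rw [umkehrAlt_eq]
    simp only [PySem.Set.contains, PySem.Set.empty] at *
    simp only [List.contains_nil, Bool.false_or, this]
    show cnt xs + _ = cnt (x :: xs)
    show cnt xs + _ = (if xs.any (fun v => x == umkehr v) then 1 else 0) + cnt xs
    split_ifs <;> ring

-- ===== VERDICT (by name: the statement is the Claim_ definition above) =====
theorem symmetrisch_spec : Claim_equal_symmetrisch := by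
  intro l _
  show symmetrisch l = symmetrisch_alt l
  rw [symmetrisch_eq_cnt, symmetrisch_alt_eq_cnt]
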